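-- pv_equiv track=rewrite | github.com/rajpratham1/Peresonal_Assistant | backend/utils/parser.py | split_compound_commands
-- ===== SOURCE A (Python) =====
-- def split_compound_commands(text: str) -> list[str]:
--     separators = (" and then ", " then ", " and ")
--     commands = [text.strip()]
--     for separator in separators:
--         next_commands: list[str] = []
--         for command in commands:
--             parts = [part.strip() for part in command.split(separator) if part.strip()]
--             next_commands.extend(parts if parts else [command])
--         commands = next_commands
--     return commands
-- ===== SOURCE B (Python) =====
-- def split_compound_commands(text: str) -> list[str]:
--     def go(command: str, seps: tuple) -> list[str]:
--         if not seps: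
--             return [command]
--         parts = [part.strip() for part in command.split(seps[0]) if part.strip()]
--         return [c for part in (parts if parts else [command]) for c in go(part, seps[1:])]
--     return go(text.strip(), (" and then ", " then ", " and "))
-- ===== Notes on version B (the rewrite author's own statement) =====
-- stated objective: alternative
-- what changed: Replaces the three breadth-first worklist passes (rebuilding the whole command list per separator) with a single depth-first recursion over the separator list that emits final commands directly via flatMap.
import Mathlib
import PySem

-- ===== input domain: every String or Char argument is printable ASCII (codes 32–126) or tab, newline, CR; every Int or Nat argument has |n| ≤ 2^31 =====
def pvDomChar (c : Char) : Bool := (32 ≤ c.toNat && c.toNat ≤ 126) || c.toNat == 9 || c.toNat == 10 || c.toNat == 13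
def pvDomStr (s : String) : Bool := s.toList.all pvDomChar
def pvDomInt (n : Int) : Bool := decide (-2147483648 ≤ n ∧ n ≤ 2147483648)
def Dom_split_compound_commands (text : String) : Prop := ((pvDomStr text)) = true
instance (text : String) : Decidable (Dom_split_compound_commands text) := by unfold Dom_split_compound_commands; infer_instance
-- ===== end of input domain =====

-- B replaces A's three sequential worklist passes by one depth-first recursion over the
-- separator list (alternative decomposition, same result and cost).

-- ===== PORT A =====
def split_compound_commands (text : String) : List String :=
  let separators := [" and then ", " then ", " and "]
  let commands := [PySem.Str.strip text]
  separators.foldl (fun commands separator =>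
    commands.foldl (fun next_commands command =>
      -- command.split(separator): separators are nonempty literals, so Python never
      -- raises; ported exactly via PySem.Chars.splitOn (the sep ≠ "" form)
      let parts := ((PySem.Chars.splitOn command.toList separator.toList).map
        (fun p => PySem.Str.strip (String.mk p))).filter (fun p => p ≠ "")
      next_commands ++ (if parts ≠ [] then parts else [command])) []) commands

-- ===== PORT B =====
def pvGo (command : String) (seps : List String) : List String :=
  match seps with
  | [] => [command]
  | sep :: rest =>
    -- command.split(seps[0]): nonempty literal separators, exact via Chars.splitOn
    let parts := ((PySem.Chars.splitOn command.toList sep.toList).map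
      (fun p => PySem.Str.strip (String.mk p))).filter (fun p => p ≠ "")
    (if parts ≠ [] then parts else [command]).flatMap (fun part => pvGo part rest)

def split_compound_commands_alt (text : String) : List String :=
  pvGo (PySem.Str.strip text) [" and then ", " then ", " and "]

-- ===== PRECONDITION & SPEC =====
def Spec_split_compound_commands (text : String) (out : List String) : Prop := out = split_compound_commands_alt text
instance (text : String) (out : List String) : Decidable (Spec_split_compound_commands text out) := by unfold Spec_split_compound_commands; infer_instance

-- ===== CLAIM (what is proved, stated in full; the proofs are below) =====
def Claim_equal_split_compound_commands : Prop := ∀ (text : String), Dom_split_compound_commands text → Spec_split_compound_commands text (split_compound_commands text)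

-- ===== LEMMAS AND PROOFS =====

-- one pass of A on one command (definitionally the body of both ports' per-separator step)
def pvStep (sep command : String) : List String :=
  let parts := ((PySem.Chars.splitOn command.toList sep.toList).map
    (fun p => PySem.Str.strip (String.mk p))).filter (fun p => p ≠ "")
  if parts ≠ [] then parts else [command]

theorem pvFoldl_append (f : String → List String) :
    ∀ (cs : List String) (acc : List String),
      cs.foldl (fun a c => a ++ f c) acc = acc ++ cs.flatMap f := by
  intro cs
  induction cs with
  | nil => intro acc; simp
  | cons c cs ih => intro acc; simp [List.foldl_cons, ih, List.append_assoc]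

theorem pvGo_eq :
    ∀ (seps : List String) (cs : List String),
      seps.foldl (fun commands separator =>
          commands.foldl (fun next_commands command =>
            next_commands ++ pvStep separator command) []) cs
        = cs.flatMap (fun c => pvGo c seps) := by
  intro seps
  induction seps with
  | nil => intro cs; simp [pvGo]
  | cons sep rest ih =>
      intro cs
      have hstep : cs.foldl (fun a c => a ++ pvStep sep c) [] = cs.flatMap (pvStep sep) := by
        simpa using pvFoldl_append (pvStep sep) cs []
      calc (sep :: rest).foldl (fun commands separator =>
              commands.foldl (fun next_commands command =>
                next_commands ++ pvStep separator command) []) cs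
          = rest.foldl (fun commands separator =>
              commands.foldl (fun next_commands command =>
                next_commands ++ pvStep separator command) []) (cs.flatMap (pvStep sep)) := by
            rw [List.foldl_cons, hstep]
        _ = (cs.flatMap (pvStep sep)).flatMap (fun c => pvGo c rest) := ih _
        _ = cs.flatMap (fun c => pvGo c (sep :: rest)) := by
            rw [List.flatMap_assoc]; simp only [pvGo, pvStep]

-- ===== VERDICT (by name: the statement is the Claim_ definition above) =====
theorem split_compound_commands_spec : Claim_equal_split_compound_commands := by
  intro text _
  show split_compound_commands text = split_compound_commands_alt text
  have h := pvGo_eq [" and then ", " then ", " and "] [PySem.Str.strip text]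
  simpa [split_compound_commands, split_compound_commands_alt, pvStep] using h
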